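-- pv_equiv track=rewrite | github.com/mauroarcidiacono/data-structures-and-algorithms | greedy/partition_array_such_that_max_diff_is_k.py | partitionArray
-- ===== SOURCE A (Python) =====
-- from typing import List
--
-- def partitionArray(nums: List[int], k: int) -> int:
--     nums.sort()
--     x = nums[0]
--     ans = 1
--
--     for i in range(len(nums)):
--         if (nums[i] - x > k):
--             x = nums[i]
--             ans += 1
--
--     return ans
-- ===== SOURCE B (Python) =====
-- def partitionArray(nums, k):
--     # Sorts nums in place (same observable mutation as A); raises IndexError on [] like A.
--     nums.sort()
--     n = len(nums)
--     x = nums[0]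
--     ans = 1
--     i = 0
--     while True:
--         # binary search: first index j in [i, n) with nums[j] > x + k
--         lo, hi = i, n
--         while lo < hi:
--             mid = (lo + hi) // 2
--             if nums[mid] > x + k:
--                 hi = mid
--             else:
--                 lo = mid + 1
--         if lo == n:
--             return ans
--         x = nums[lo]
--         ans += 1
--         i = lo + 1
-- ===== Notes on version B (the rewrite author's own statement) =====
-- stated objective: alternative
-- what changed: Replaces A's element-by-element scan after sorting with group jumps: a hand-written binary search finds the first element exceeding leader+k, counting one partition per jump instead of testing every element.
import Mathlib
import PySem

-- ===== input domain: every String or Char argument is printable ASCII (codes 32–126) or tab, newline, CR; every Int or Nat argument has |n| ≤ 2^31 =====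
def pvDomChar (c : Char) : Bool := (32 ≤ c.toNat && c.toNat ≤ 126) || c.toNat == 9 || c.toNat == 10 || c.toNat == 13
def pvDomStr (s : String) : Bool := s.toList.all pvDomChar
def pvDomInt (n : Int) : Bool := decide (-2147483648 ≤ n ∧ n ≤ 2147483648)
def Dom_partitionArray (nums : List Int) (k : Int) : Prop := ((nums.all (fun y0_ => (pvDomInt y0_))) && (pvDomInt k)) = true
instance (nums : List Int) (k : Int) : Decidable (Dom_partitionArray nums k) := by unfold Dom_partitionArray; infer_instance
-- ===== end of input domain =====

-- B replaces A's post-sort element-by-element scan with binary-search jumps from group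
-- leader to group leader (objective: alternative algorithm; the sort cost dominates both).
-- Both A and B sort `nums` in place (the same observable mutation); the equivalence
-- proved here is about the return value.


-- ===== PORT A =====
-- literal transliteration of A: sort, take nums[0] as leader, scan i over range(len(nums))
def partitionArray (nums : List Int) (k : Int) : Int :=
  let s := PySem.List.sorted nums (fun x => x) false
  let x0 := PySem.List.pyGetD s 0 0
  let st := (PySem.List.pyRange 0 (s.length : Int) 1).foldl
    (fun (st : Int × Int) i =>
      if PySem.List.pyGetD s i 0 - st.1 > k then (PySem.List.pyGetD s i 0, st.2 + 1) else st)
    (x0, 1)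
  st.2

-- ===== PORT B =====
-- inner `while lo < hi` binary search of Source B: first index in [lo, hi) whose element > t.
-- fuel (= hi - lo at the call site) only makes the recursion structural; it never runs out.
def pvBSearchGo (s : List Int) (t : Int) : Nat → Nat → Nat → Nat
  | 0, lo, _ => lo
  | fuel + 1, lo, hi =>
    if lo < hi then
      if PySem.List.pyGetD s (((lo + hi) / 2 : Nat) : Int) 0 > t then
        pvBSearchGo s t fuel lo ((lo + hi) / 2)
      else
        pvBSearchGo s t fuel ((lo + hi) / 2 + 1) hi
    else lo

def pvBSearch (s : List Int) (t : Int) (lo hi : Nat) : Nat :=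
  pvBSearchGo s t (hi - lo) lo hi

-- outer `while True` loop of Source B: jump to the next group leader, one partition per jump.
-- fuel (= len + 1 - i at the call site) only makes the loop structural; it never runs out.
def pvJumpGo (s : List Int) (k : Int) : Nat → Int → Int → Nat → Int
  | 0, _, ans, _ => ans
  | fuel + 1, x, ans, i =>
    if pvBSearch s (x + k) i s.length < s.length then
      pvJumpGo s k fuel
        (PySem.List.pyGetD s ((pvBSearch s (x + k) i s.length : Nat) : Int) 0) (ans + 1)
        (pvBSearch s (x + k) i s.length + 1)
    else ans

def pvJump (s : List Int) (k : Int) (x : Int) (ans : Int) (i : Nat) : Int :=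
  pvJumpGo s k (s.length + 1 - i) x ans i

def partitionArray_alt (nums : List Int) (k : Int) : Int :=
  let s := PySem.List.sorted nums (fun x => x) false
  let x := PySem.List.pyGetD s 0 0
  pvJump s k x 1 0

-- ===== PRECONDITION & SPEC =====
-- A raises IndexError on the empty list (nums[0]); B raises there too.
def Pre_partitionArray (nums : List Int) (k : Int) : Prop := nums ≠ []
instance (nums : List Int) (k : Int) : Decidable (Pre_partitionArray nums k) := by unfold Pre_partitionArray; infer_instance
def pvWitness_partitionArray : List Int × Int := ([1, 6, 3, 2], 2)

def Spec_partitionArray (nums : List Int) (k : Int) (out : Int) : Prop := out = partitionArray_alt nums k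
instance (nums : List Int) (k : Int) (out : Int) : Decidable (Spec_partitionArray nums k out) := by unfold Spec_partitionArray; infer_instance

-- ===== CLAIM (what is proved, stated in full; the proofs are below) =====
def Claim_equal_partitionArray : Prop := ∀ (nums : List Int) (k : Int), Dom_partitionArray nums k → Pre_partitionArray nums k → Spec_partitionArray nums k (partitionArray nums k)

-- ===== LEMMAS AND PROOFS =====

-- A's loop step
def pvStep (k : Int) (st : Int × Int) (v : Int) : Int × Int :=
  if v - st.1 > k then (v, st.2 + 1) else st

-- a run of elements ≤ x + k leaves A's state unchanged
theorem pvStep_const (k x ans : Int) (l : List Int) (h : ∀ v ∈ l, ¬ (v - x > k)) :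
    l.foldl (pvStep k) (x, ans) = (x, ans) := by
  induction l with
  | nil => rfl
  | cons v l ih =>
    simp only [List.foldl_cons, pvStep, if_neg (h v (by simp))]
    exact ih (fun v hv => h v (by simp [hv]))

theorem pvBSearchGo_ge (s : List Int) (t : Int) :
    ∀ (fuel lo hi : Nat), lo ≤ pvBSearchGo s t fuel lo hi := by
  intro fuel
  induction fuel with
  | zero => intro lo hi; exact Nat.le_refl lo
  | succ fuel ih =>
    intro lo hi
    rw [pvBSearchGo]
    split
    · split
      · exact ih lo ((lo + hi) / 2)
      · exact le_trans (by omega) (ih ((lo + hi) / 2 + 1) hi)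
    · exact Nat.le_refl lo

theorem pvBSearch_ge (s : List Int) (t : Int) (lo hi : Nat) : lo ≤ pvBSearch s t lo hi :=
  pvBSearchGo_ge s t (hi - lo) lo hi

-- binary-search correctness on a monotone list:
-- every index below the result holds an element ≤ t, and the result's element (if in range) is > t
theorem pvBSearchGo_spec (s : List Int) (t : Int)
    (hmono : ∀ p q : Nat, p ≤ q → q < s.length → s.getD p 0 ≤ s.getD q 0) :
    ∀ (fuel lo hi : Nat), hi - lo ≤ fuel → lo ≤ hi → hi ≤ s.length →
    pvBSearchGo s t fuel lo hi ≤ hi ∧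
    (∀ j : Nat, lo ≤ j → j < pvBSearchGo s t fuel lo hi → s.getD j 0 ≤ t) ∧
    (pvBSearchGo s t fuel lo hi < hi → s.getD (pvBSearchGo s t fuel lo hi) 0 > t) := by
  intro fuel
  induction fuel with
  | zero =>
    intro lo hi hf hlo hhi
    have : lo = hi := by omega
    rw [pvBSearchGo]
    exact ⟨by omega, by omega, by omega⟩
  | succ fuel ih =>
    intro lo hi hf hlo hhi
    rw [pvBSearchGo]
    by_cases h : lo < hi
    · rw [if_pos h]
      by_cases hb : PySem.List.pyGetD s (((lo + hi) / 2 : Nat) : Int) 0 > t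
      · -- went left: s[(lo+hi)/2] > t
        rw [if_pos hb]
        rcases ih lo ((lo + hi) / 2) (by omega) (by omega) (by omega) with ⟨h1, h2, h3⟩
        refine ⟨by omega, h2, ?_⟩
        intro hr
        rcases Nat.lt_or_ge (pvBSearchGo s t fuel lo ((lo + hi) / 2)) ((lo + hi) / 2) with hlt | hge
        · exact h3 hlt
        · have heq : pvBSearchGo s t fuel lo ((lo + hi) / 2) = (lo + hi) / 2 := by omega
          rw [heq]
          rw [PySem.List.pyGetD_natCast] at hb
          exact hb
      · -- went right: s[(lo+hi)/2] ≤ t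
        rw [if_neg hb]
        rcases ih ((lo + hi) / 2 + 1) hi (by omega) (by omega) hhi with ⟨h1, h2, h3⟩
        rw [PySem.List.pyGetD_natCast] at hb
        have hb' : s.getD ((lo + hi) / 2) 0 ≤ t := by omega
        refine ⟨h1, ?_, h3⟩
        intro j hj hjr
        rcases Nat.lt_or_ge j ((lo + hi) / 2 + 1) with hlt | hge
        · exact le_trans (hmono j ((lo + hi) / 2) (by omega)
            (by have := pvBSearchGo_ge s t fuel ((lo + hi) / 2 + 1) hi; omega)) hb'
        · exact h2 j hge hjr
    · rw [if_neg h]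
      exact ⟨by omega, by omega, by omega⟩

theorem pvBSearch_spec (s : List Int) (t : Int) (lo hi : Nat)
    (hmono : ∀ p q : Nat, p ≤ q → q < s.length → s.getD p 0 ≤ s.getD q 0)
    (hlo : lo ≤ hi) (hhi : hi ≤ s.length) :
    pvBSearch s t lo hi ≤ hi ∧
    (∀ j : Nat, lo ≤ j → j < pvBSearch s t lo hi → s.getD j 0 ≤ t) ∧
    (pvBSearch s t lo hi < hi → s.getD (pvBSearch s t lo hi) 0 > t) :=
  pvBSearchGo_spec s t hmono (hi - lo) lo hi (Nat.le_refl _) hlo hhi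

-- main invariant: on a monotone list, A's remaining scan from state (x, ans) at index i
-- computes exactly B's jump loop
theorem pvMainGo (s : List Int) (k : Int)
    (hmono : ∀ p q : Nat, p ≤ q → q < s.length → s.getD p 0 ≤ s.getD q 0) :
    ∀ (fuel : Nat) (i : Nat) (x ans : Int), s.length - i < fuel → i ≤ s.length →
      ((s.drop i).foldl (pvStep k) (x, ans)).2 = pvJumpGo s k fuel x ans i := by
  intro fuel
  induction fuel with
  | zero => intro i x ans hm hi; omega
  | succ fuel ih =>
    intro i x ans hm hi
    rw [pvJumpGo]
    rcases pvBSearch_spec s (x + k) i s.length hmono hi (Nat.le_refl _) with ⟨h1, h2, h3⟩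
    have hir := pvBSearch_ge s (x + k) i s.length
    generalize hgen : pvBSearch s (x + k) i s.length = r at h1 h2 h3 hir ⊢
    by_cases hcase : r < s.length
    · -- split drop i at index r
      rw [if_pos hcase]
      have hdrop : s.drop i = (s.drop i).take (r - i) ++ s[r] :: s.drop (r + 1) := by
        conv_lhs => rw [← List.take_append_drop (r - i) (s.drop i)]
        congr 1
        rw [List.drop_drop]
        have hri : i + (r - i) = r := by omega
        rw [hri, List.getElem_cons_drop hcase]
      rw [hdrop, List.foldl_append]
      have hconst : ((s.drop i).take (r - i)).foldl (pvStep k) (x, ans) = (x, ans) := by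
        apply pvStep_const
        intro v hv
        rw [List.mem_iff_getElem] at hv
        obtain ⟨j, hj, hveq⟩ := hv
        have hjlen : j < r - i := by
          have := List.length_take_le (r - i) (s.drop i)
          omega
        have : v = s[i + j] := by
          rw [← hveq, List.getElem_take, List.getElem_drop]
        have hle : s.getD (i + j) 0 ≤ x + k := h2 (i + j) (by omega) (by omega)
        rw [List.getD_eq_getElem s 0 (by omega)] at hle
        omega
      rw [hconst]
      simp only [List.foldl_cons, pvStep]
      have hgt : s[r] - x > k := by
        have := h3 hcase
        rw [List.getD_eq_getElem s 0 hcase] at this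
        omega
      rw [if_pos hgt]
      have hpg : PySem.List.pyGetD s (r : Int) 0 = s[r] := by
        rw [PySem.List.pyGetD_natCast, List.getD_eq_getElem s 0 hcase]
      rw [hpg]
      have h5 : s.length - (r + 1) < fuel := by omega
      exact ih (r + 1) s[r] (ans + 1) h5 hcase
    · rw [if_neg hcase]
      have hconst : (s.drop i).foldl (pvStep k) (x, ans) = (x, ans) := by
        apply pvStep_const
        intro v hv
        rw [List.mem_iff_getElem] at hv
        obtain ⟨j, hj, hveq⟩ := hv
        rw [List.length_drop] at hj
        have hlen : i + j < s.length := by omega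
        have hle := h2 (i + j) (by omega) (by omega)
        rw [List.getD_eq_getElem s 0 hlen] at hle
        have hv2 : v = s[i + j] := by rw [← hveq, List.getElem_drop]
        omega
      rw [hconst]

theorem sorted_getD_mono (nums : List Int) (p q : Nat) (hpq : p ≤ q)
    (hq : q < (PySem.List.sorted nums (fun x => x) false).length) :
    (PySem.List.sorted nums (fun x => x) false).getD p 0 ≤ (PySem.List.sorted nums (fun x => x) false).getD q 0 := by
  rw [List.getD_eq_getElem _ 0 (by omega), List.getD_eq_getElem _ 0 hq]
  exact PySem.List.sorted_id_getElem_mono nums hpq hq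

-- ===== VERDICT (by name: the statement is the Claim_ definition above) =====
theorem partitionArray_spec : Claim_equal_partitionArray := by
  intro nums k _hdom _hpre
  unfold Spec_partitionArray partitionArray partitionArray_alt
  simp only
  have hlam : (fun (st : Int × Int) i =>
      if PySem.List.pyGetD (PySem.List.sorted nums (fun x => x) false) i 0 - st.1 > k then
        (PySem.List.pyGetD (PySem.List.sorted nums (fun x => x) false) i 0, st.2 + 1)
      else st) =
      (fun (acc : Int × Int) j =>
        pvStep k acc (PySem.List.pyGetD (PySem.List.sorted nums (fun x => x) false) j 0)) := by
    funext st i; simp [pvStep]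
  rw [hlam]
  rw [PySem.List.foldl_pyRange_zero_pyGetD' (PySem.List.sorted nums (fun x => x) false) 0
        (pvStep k) (PySem.List.pyGetD (PySem.List.sorted nums (fun x => x) false) 0 0, 1)]
  have := pvMainGo (PySem.List.sorted nums (fun x => x) false) k
    (fun p q hpq hq => sorted_getD_mono nums p q hpq hq)
    ((PySem.List.sorted nums (fun x => x) false).length + 1) 0
    (PySem.List.pyGetD (PySem.List.sorted nums (fun x => x) false) 0 0) 1
    (by omega) (by omega)
  rw [List.drop_zero] at this
  exact this
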